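-- pv_equiv track=rewrite | github.com/antwisearch/the-world | antwi_agent.py | decide_actions
-- ===== SOURCE A (Python) =====
-- def decide_actions(agent):
--     """Decide what actions to take based on needs and inventory"""
--     actions = []
--     ap_remaining = 3
--
--     needs = agent.get("needs", {})
--     inventory = agent.get("inventory", {})
--
--     # Strategy from SKILL.md:
--     # 1. Balance needs - don't let any drop below 25%
--     # 2. Gather early - build resource reserves
--     # 3. Build shelter for survival
--
--     # Priority 1: Check critical needs
--     if needs.get("food", 100) < 30:
--         actions.append({"action": "gather_food"})
--         ap_remaining -= 1
--     elif needs.get("water", 100) < 30: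
--         # Need to find water source first
--         actions.append({"action": "rest"})  # Can't drink without water
--         ap_remaining -= 1
--
--     # Priority 2: Build resources for shelter (need 10 wood)
--     wood = inventory.get("wood", 0)
--     while ap_remaining > 0 and wood < 10:
--         actions.append({"action": "gather_wood"})
--         ap_remaining -= 1
--         wood += 2
--
--     # Use remaining AP
--     while ap_remaining > 0:
--         if needs.get("happiness", 100) < 50:
--             actions.append({"action": "rest"})
--         else:
--             actions.append({"action": "gather_food"})  # Always good to have food
--         ap_remaining -= 1
--
--     return actions
-- ===== SOURCE B (Python) =====
-- def decide_actions(agent):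
--     """Decide what actions to take based on needs and inventory"""
--     needs = agent.get("needs", {})
--     inventory = agent.get("inventory", {})
--
--     ap_remaining = 3
--     actions = []
--     if needs.get("food", 100) < 30:
--         actions.append({"action": "gather_food"})
--         ap_remaining -= 1
--     elif needs.get("water", 100) < 30:
--         actions.append({"action": "rest"})
--         ap_remaining -= 1
--
--     # wood gathering as arithmetic: each gather adds 2 wood, goal is 10
--     wood = inventory.get("wood", 0)
--     n_wood = min(ap_remaining, max(0, -(-(10 - wood) // 2)))
--     actions += [{"action": "gather_wood"} for _ in range(n_wood)]
--     ap_remaining -= n_wood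
--
--     # filler action is the same every remaining turn: choose it once
--     filler = {"action": "rest"} if needs.get("happiness", 100) < 50 else {"action": "gather_food"}
--     actions += [dict(filler) for _ in range(ap_remaining)]
--     return actions
-- ===== Notes on version B (the rewrite author's own statement) =====
-- stated objective: simpler
-- what changed: Replaces both while-loops with closed-form counts: the wood loop becomes n_wood = min(ap, max(0, ceil((10-wood)/2))) copies of gather_wood, and the filler action is chosen once and replicated for the remaining AP.
import Mathlib
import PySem

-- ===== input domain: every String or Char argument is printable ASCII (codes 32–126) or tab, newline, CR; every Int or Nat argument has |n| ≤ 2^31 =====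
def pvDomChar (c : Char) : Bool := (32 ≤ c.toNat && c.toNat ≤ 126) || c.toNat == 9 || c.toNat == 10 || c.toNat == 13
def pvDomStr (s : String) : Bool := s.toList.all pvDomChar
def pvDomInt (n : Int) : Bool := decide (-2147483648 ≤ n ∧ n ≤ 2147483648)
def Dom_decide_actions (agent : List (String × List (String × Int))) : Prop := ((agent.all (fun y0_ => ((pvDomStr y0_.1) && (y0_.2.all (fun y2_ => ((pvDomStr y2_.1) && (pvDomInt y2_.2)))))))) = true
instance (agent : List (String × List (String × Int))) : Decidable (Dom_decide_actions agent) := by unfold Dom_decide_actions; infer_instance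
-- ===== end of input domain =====

-- B replaces A's two while-loops with closed-form counts (ceil-division for wood, one replicated filler action); objective: simpler.


-- ===== PORT A =====
-- while ap_remaining > 0 and wood < 10: append gather_wood; ap -= 1; wood += 2
def aWoodLoop (actions : List (List (String × String))) (ap wood : Int) :
    List (List (String × String)) × Int :=
  if ap > 0 ∧ wood < 10 then
    aWoodLoop (actions ++ [[("action", "gather_wood")]]) (ap - 1) (wood + 2)
  else (actions, ap)
termination_by ap.toNat
decreasing_by omega

-- while ap_remaining > 0: append rest / gather_food depending on happiness; ap -= 1
def aRestLoop (needs : List (String × Int)) (actions : List (List (String × String))) (ap : Int) :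
    List (List (String × String)) :=
  if ap > 0 then
    aRestLoop needs
      (actions ++ [if PySem.Dict.getD (PySem.Dict.mk needs) "happiness" (100:Int) < 50 then
                     [("action", "rest")] else [("action", "gather_food")]])
      (ap - 1)
  else actions
termination_by ap.toNat
decreasing_by omega

def decide_actions (agent : List (String × List (String × Int))) : List (List (String × String)) :=
  let needs := PySem.Dict.getD (PySem.Dict.mk agent) "needs" []
  let inventory := PySem.Dict.getD (PySem.Dict.mk agent) "inventory" []
  let (actions, ap_remaining) :=
    if PySem.Dict.getD (PySem.Dict.mk needs) "food" (100:Int) < 30 then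
      ([[("action", "gather_food")]], (3 : Int) - 1)
    else if PySem.Dict.getD (PySem.Dict.mk needs) "water" (100:Int) < 30 then
      ([[("action", "rest")]], (3 : Int) - 1)
    else ([], (3 : Int))
  let wood := PySem.Dict.getD (PySem.Dict.mk inventory) "wood" (0:Int)
  let (actions, ap_remaining) := aWoodLoop actions ap_remaining wood
  aRestLoop needs actions ap_remaining

-- ===== PORT B =====
def decide_actions_alt (agent : List (String × List (String × Int))) : List (List (String × String)) :=
  let needs := PySem.Dict.getD (PySem.Dict.mk agent) "needs" []
  let inventory := PySem.Dict.getD (PySem.Dict.mk agent) "inventory" []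
  let (actions, ap0) :=
    if PySem.Dict.getD (PySem.Dict.mk needs) "food" (100:Int) < 30 then
      ([[("action", "gather_food")]], (3 : Int) - 1)
    else if PySem.Dict.getD (PySem.Dict.mk needs) "water" (100:Int) < 30 then
      ([[("action", "rest")]], (3 : Int) - 1)
    else ([], (3 : Int))
  let wood := PySem.Dict.getD (PySem.Dict.mk inventory) "wood" (0:Int)
  let n_wood := min ap0 (max 0 (-(PySem.Int.floordiv (-(10 - wood)) 2)))
  let filler := if PySem.Dict.getD (PySem.Dict.mk needs) "happiness" (100:Int) < 50 then
                  [("action", "rest")] else [("action", "gather_food")]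
  actions ++ List.replicate n_wood.toNat [("action", "gather_wood")]
          ++ List.replicate (ap0 - n_wood).toNat filler

-- ===== PRECONDITION & SPEC =====
def Spec_decide_actions (agent : List (String × List (String × Int))) (out : List (List (String × String))) : Prop := out = decide_actions_alt agent
instance (agent : List (String × List (String × Int))) (out : List (List (String × String))) : Decidable (Spec_decide_actions agent out) := by unfold Spec_decide_actions; infer_instance

-- ===== CLAIM (what is proved, stated in full; the proofs are below) =====
def Claim_equal_decide_actions : Prop := ∀ (agent : List (String × List (String × Int))), Dom_decide_actions agent → Spec_decide_actions agent (decide_actions agent)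

-- ===== LEMMAS AND PROOFS =====

-- ceiling count c(wood) = -((wood-10)//2) as omega-friendly ediv
lemma ceil_eq (wood : Int) :
    -(PySem.Int.floordiv (-(10 - wood)) 2) = -((wood - 10) / 2) := by
  have h : (-(10 - wood)) = wood - 10 := by ring
  rw [h, PySem.Int.floordiv_eq_ediv_of_pos (by omega)]

lemma aWoodLoop_eq (ap : Int) (wood : Int) (actions : List (List (String × String)))
    (hap : 0 ≤ ap) :
    aWoodLoop actions ap wood =
      (actions ++ List.replicate (min ap (max 0 (-((wood - 10) / 2)))).toNat
          [("action", "gather_wood")],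
       ap - min ap (max 0 (-((wood - 10) / 2)))) := by
  fun_induction aWoodLoop actions ap wood with
  | case1 actions ap wood h ih =>
    rw [ih (by omega)]
    have h2 : (min ap (max 0 (-((wood - 10) / 2)))).toNat
        = (min (ap - 1) (max 0 (-((wood + 2 - 10) / 2)))).toNat + 1 := by omega
    have h3 : ap - min ap (max 0 (-((wood - 10) / 2)))
        = ap - 1 - min (ap - 1) (max 0 (-((wood + 2 - 10) / 2))) := by omega
    rw [h2, h3, List.replicate_succ, List.append_assoc]
    simp
  | case2 actions ap wood h =>
    have h2 : (min ap (max 0 (-((wood - 10) / 2)))).toNat = 0 := by omega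
    have h3 : min ap (max 0 (-((wood - 10) / 2))) = 0 := by omega
    rw [h2, h3]
    simp

lemma aRestLoop_eq (needs : List (String × Int)) (ap : Int)
    (actions : List (List (String × String))) :
    aRestLoop needs actions ap =
      actions ++ List.replicate ap.toNat
        (if PySem.Dict.getD (PySem.Dict.mk needs) "happiness" (100:Int) < 50 then
           [("action", "rest")] else [("action", "gather_food")]) := by
  fun_induction aRestLoop needs actions ap with
  | case1 actions ap h ih =>
    rw [dite_eq_ite] at ih
    rw [ih]
    have h2 : ap.toNat = (ap - 1).toNat + 1 := by omega
    rw [h2, List.replicate_succ, List.append_assoc]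
    simp
  | case2 actions ap h =>
    have h2 : ap.toNat = 0 := by omega
    rw [h2]
    simp

-- ===== VERDICT (by name: the statement is the Claim_ definition above) =====
theorem decide_actions_spec : Claim_equal_decide_actions := by
  intro agent _
  show decide_actions agent = decide_actions_alt agent
  unfold decide_actions decide_actions_alt
  dsimp only
  split_ifs with h1 h2 <;>
  · dsimp only
    rw [aWoodLoop_eq _ _ _ (by omega), aRestLoop_eq, ceil_eq]
    simp [*]
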